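-- pv_equiv track=rewrite | github.com/nayoung240/af_withdrawl_batch | sunukim/algorithm/etc/programmers1.py | solution
-- ===== SOURCE A (Python) =====
-- def solution(no, works):
--     result = 0
--     while True:
--         biggest_work = max(works)
--         if(biggest_work != 0):
--             biggest_count = works.count(biggest_work)
--             res_list = list(filter(lambda x: works[x] == biggest_work, range(len(works))))
--             if(no > biggest_count):
--                 for i in res_list:
--                     works[i] -= 1
--                 no -= biggest_count
--             else:
--                 for i in res_list:
--                     if(no == 0):
--                         break
--                     works[i] -= 1
--                     no -= 1
--
--                 if(no == 0 or len(works) == 0):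
--                     break
--
--         else:
--             break
--         if(no == 0 or len(works) == 0):
--             break
--
--     for i in works:
--         result += pow(i,2)
--
--     return result
-- ===== SOURCE B (Python) =====
-- def solution(no, works):
--     # Water-level: binary search the final level instead of simulating one unit at a time.
--     M = max(works)
--
--     def cost(L):
--         return sum(x - L for x in works if x > L)
--
--     if M >= 0:
--         no = min(no, cost(0))
--     lo, hi = M - no, M
--     while lo < hi:
--         mid = (lo + hi) // 2
--         if cost(mid) <= no:
--             hi = mid
--         else:
--             lo = mid + 1
--     L = lo
--     r = no - cost(L)
--     total = 0
--     c = 0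
--     for x in works:
--         if x >= L:
--             c += 1
--         else:
--             total += x * x
--     return total + (c - r) * L * L + r * (L - 1) * (L - 1)
-- ===== Notes on version B (the rewrite author's own statement) =====
-- stated objective: faster
-- what changed: A simulates the subtraction one level of maxima per loop iteration (O(n * units)); B binary-searches the final water level L with a cost function and computes the answer from a closed-form sum over entries relative to L.
-- outside the precondition, e.g. on solution(-1, [2]): A returns 0, B returns 9
import Mathlib
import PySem

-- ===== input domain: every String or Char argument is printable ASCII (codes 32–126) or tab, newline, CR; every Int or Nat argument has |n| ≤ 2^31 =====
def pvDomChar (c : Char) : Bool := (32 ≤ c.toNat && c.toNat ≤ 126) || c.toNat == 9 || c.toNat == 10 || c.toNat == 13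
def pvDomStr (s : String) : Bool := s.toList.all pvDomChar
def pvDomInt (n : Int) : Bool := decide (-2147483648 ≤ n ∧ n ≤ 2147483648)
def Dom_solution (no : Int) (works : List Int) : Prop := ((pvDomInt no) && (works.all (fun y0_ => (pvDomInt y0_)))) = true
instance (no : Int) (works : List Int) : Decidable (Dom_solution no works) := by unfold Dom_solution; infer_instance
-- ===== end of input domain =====

-- B re-implements A by binary-searching the final water level instead of simulating unit-by-unit
-- subtraction; equivalence is about the RETURN value only (Python A mutates `works` in place, B does not).

-- ===== PORT A =====
-- res_list = list(filter(lambda x: works[x] == biggest, range(len(works))))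
def resList (works : List Int) (biggest : Int) : List Int :=
  (PySem.List.pyRange 0 (works.length : Int) 1).filter
    (fun x => PySem.List.pyGetD works x 0 = biggest)

-- 'for i in res_list: works[i] -= 1'  (the no > biggest_count branch)
def decAllIdx (works : List Int) (idxs : List Int) : List Int :=
  idxs.foldl (fun w i => PySem.List.pySetD w i (PySem.List.pyGetD w i 0 - 1)) works

-- 'for i in res_list: if no == 0: break; works[i] -= 1; no -= 1'  (the else branch)
def decSomeIdx (works : List Int) (no : Int) (idxs : List Int) : List Int × Int :=
  match idxs with
  | [] => (works, no)
  | i :: rest =>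
    if no = 0 then (works, no)
    else decSomeIdx (PySem.List.pySetD works i (PySem.List.pyGetD works i 0 - 1)) (no - 1) rest

-- the 'while True' loop; fuel only makes the recursion total (Python diverges for some
-- negative `no`, which Pre_ excludes; inside Pre_ the fuel used below is always sufficient)
def loopA (fuel : Nat) (no : Int) (works : List Int) : List Int :=
  match fuel with
  | 0 => works
  | fuel + 1 =>
    match PySem.List.max? works (fun y => y) with
    | none => works      -- Python: max([]) raises ValueError (excluded by Pre_)
    | some biggest =>
      if biggest ≠ 0 then
        let cnt : Int := (PySem.List.count works biggest : Int)
        let rl := resList works biggest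
        if no > cnt then
          let w' := decAllIdx works rl
          let no' := no - cnt
          if no' = 0 ∨ w'.length = 0 then w' else loopA fuel no' w'
        else
          let p := decSomeIdx works no rl
          if p.2 = 0 ∨ p.1.length = 0 then p.1           -- inner 'break' check
          else if p.2 = 0 ∨ p.1.length = 0 then p.1      -- identical bottom-of-loop check
          else loopA fuel p.2 p.1
      else works

def solution (no : Int) (works : List Int) : Int :=
  (loopA (no.toNat + 1) no works).foldl (fun r i => r + i * i) 0

-- ===== PORT B =====
-- cost(L) = sum(x - L for x in works if x > L)
def costB (works : List Int) (L : Int) : Int :=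
  (works.map (fun x => if x > L then x - L else 0)).sum

theorem pvMidBounds (lo hi : Int) (h : lo < hi) :
    lo ≤ PySem.Int.floordiv (lo + hi) 2 ∧ PySem.Int.floordiv (lo + hi) 2 < hi := by
  have h2 : (lo + hi).fdiv 2 = (lo + hi) / 2 := by rw [Int.fdiv_eq_ediv]; simp
  simp [PySem.Int.floordiv, h2]; omega

-- the 'while lo < hi' binary search
def bsearchB (works : List Int) (no : Int) (lo hi : Int) : Int :=
  if h : lo < hi then
    let mid := PySem.Int.floordiv (lo + hi) 2
    if costB works mid ≤ no then bsearchB works no lo mid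
    else bsearchB works no (mid + 1) hi
  else lo
termination_by (hi - lo).toNat
decreasing_by
  · have := pvMidBounds lo hi h; omega
  · have := pvMidBounds lo hi h; omega

def solution_alt (no : Int) (works : List Int) : Int :=
  match PySem.List.max? works (fun y => y) with
  | none => 0          -- Python: max([]) raises ValueError (excluded by Pre_)
  | some M =>
    let no' := if M ≥ 0 then min no (costB works 0) else no
    let L := bsearchB works no' (M - no') M
    let r := no' - costB works L
    let p := works.foldl
      (fun (p : Int × Int) x => if x ≥ L then (p.1, p.2 + 1) else (p.1 + x * x, p.2)) (0, 0)
    p.1 + (p.2 - r) * L * L + r * (L - 1) * (L - 1)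

-- ===== PRECONDITION & SPEC =====
-- Pre_ excludes the empty list, on which A raises ValueError (max of an empty sequence), and
-- negative `no`, outside the natural domain of a unit budget, on which A either diverges
-- (all works negative) or drains every positive entry to 0 while B subtracts nothing.
def Pre_solution (no : Int) (works : List Int) : Prop := works ≠ [] ∧ 0 ≤ no
instance (no : Int) (works : List Int) : Decidable (Pre_solution no works) := by
  unfold Pre_solution; infer_instance

def pvWitness_solution : Int × List Int := (4, [4, 1, 2])

def Spec_solution (no : Int) (works : List Int) (out : Int) : Prop := out = solution_alt no works
instance (no : Int) (works : List Int) (out : Int) : Decidable (Spec_solution no works out) := by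
  unfold Spec_solution; infer_instance

-- ===== CLAIM (what is proved, stated in full; the proofs are below) =====
def Claim_equal_solution : Prop := ∀ (no : Int) (works : List Int),
  Dom_solution no works → Pre_solution no works → Spec_solution no works (solution no works)

-- ===== LEMMAS AND PROOFS =====

-- proof-side value-level views ----------------------------------------------------
def sqSum (xs : List Int) : Int := (xs.map (fun x => x * x)).sum
def lowSq (xs : List Int) (L : Int) : Int := ((xs.filter (fun x => x < L)).map (fun x => x * x)).sum
def hiCnt (xs : List Int) (L : Int) : Int := ((xs.filter (fun x => L ≤ x)).length : Int)
def ansB (xs : List Int) (L r : Int) : Int := lowSq xs L + (hiCnt xs L - r) * L * L + r * (L - 1) * (L - 1)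
def decAll (xs : List Int) (M : Int) : List Int := xs.map (fun x => if x = M then x - 1 else x)
def cnt (xs : List Int) (M : Int) : Int := (List.count M xs : Int)
def clampB (no M : Int) (xs : List Int) : Int := if M ≥ 0 then min no (costB xs 0) else no
def natIdx (xs : List Int) (M : Int) : List Nat :=
  (List.range xs.length).filter (fun k => xs.getD k 0 = M)
def decAllN (xs : List Int) (ks : List Nat) : List Int :=
  ks.foldl (fun w k => w.set k (w.getD k 0 - 1)) xs
def decSomeN (xs : List Int) (no : Int) (ks : List Nat) : List Int × Int :=
  match ks with
  | [] => (xs, no)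
  | k :: rest => if no = 0 then (xs, no) else decSomeN (xs.set k (xs.getD k 0 - 1)) (no - 1) rest

theorem sqSum_cons (x : Int) (t : List Int) : sqSum (x :: t) = x * x + sqSum t := by simp [sqSum]
theorem lowSq_cons (x : Int) (t : List Int) (L : Int) :
    lowSq (x :: t) L = (if x < L then x * x else 0) + lowSq t L := by
  simp only [lowSq, List.filter_cons]
  split_ifs with h <;> simp_all
theorem hiCnt_cons (x : Int) (t : List Int) (L : Int) :
    hiCnt (x :: t) L = (if L ≤ x then 1 else 0) + hiCnt t L := by
  simp only [hiCnt, List.filter_cons]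
  split_ifs with h <;> simp_all <;> omega
theorem cnt_cons (x : Int) (t : List Int) (M : Int) :
    cnt (x :: t) M = (if x = M then 1 else 0) + cnt t M := by
  simp only [cnt, List.count_cons, beq_iff_eq]
  split_ifs with h <;> push_cast <;> omega

theorem sqSum_foldl (xs : List Int) (a : Int) :
    xs.foldl (fun r i => r + i * i) a = a + sqSum xs := by
  induction xs generalizing a with
  | nil => simp [sqSum]
  | cons x t ih => rw [List.foldl_cons, ih]; simp [sqSum]; ring

theorem foldl_pair (xs : List Int) (L a c : Int) :
    xs.foldl (fun (p : Int × Int) x => if x ≥ L then (p.1, p.2 + 1) else (p.1 + x * x, p.2)) (a, c)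
      = (a + lowSq xs L, c + hiCnt xs L) := by
  induction xs generalizing a c with
  | nil => simp [lowSq, hiCnt]
  | cons x t ih =>
    rw [List.foldl_cons]
    by_cases hx : x ≥ L
    · simp only [hx, if_pos, ih]
      have h1 : ¬ x < L := by omega
      simp [lowSq, hiCnt, h1, hx]; omega
    · simp only [hx, if_neg, ih, not_false_iff]
      have h1 : x < L := by omega
      have h2 : ¬ L ≤ x := by omega
      simp [lowSq, hiCnt, h1, h2]; ring

-- costB facts
theorem costB_nonneg (xs : List Int) (L : Int) : 0 ≤ costB xs L := by
  induction xs with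
  | nil => simp [costB]
  | cons x t ih => simp only [costB, List.map_cons, List.sum_cons] at *; split_ifs with h <;> omega
theorem costB_antitone (xs : List Int) {L L' : Int} (h : L ≤ L') : costB xs L' ≤ costB xs L := by
  induction xs with
  | nil => simp [costB]
  | cons x t ih => simp only [costB, List.map_cons, List.sum_cons] at *; split_ifs with h1 h2 <;> omega
theorem costB_ge (xs : List Int) {M : Int} (hM : M ∈ xs) (L : Int) : M - L ≤ costB xs L := by
  induction xs with
  | nil => simp at hM
  | cons x t ih =>
    simp only [costB, List.map_cons, List.sum_cons]
    rcases List.mem_cons.1 hM with h | h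
    · subst h
      have := costB_nonneg t L
      simp only [costB] at this; split_ifs with h1 <;> omega
    · have := ih h
      simp only [costB] at this; split_ifs with h1 <;> omega
theorem costB_top (xs : List Int) {M L : Int} (hb : ∀ x ∈ xs, x ≤ M) (h : M ≤ L) : costB xs L = 0 := by
  induction xs with
  | nil => simp [costB]
  | cons x t ih =>
    have hx := hb x (by simp)
    have ht := ih (fun y hy => hb y (by simp [hy]))
    simp only [costB, List.map_cons, List.sum_cons] at *
    have : ¬ x > L := by omega
    simp [this, ht]
theorem costB_pred (xs : List Int) {M : Int} (hb : ∀ x ∈ xs, x ≤ M) : costB xs (M - 1) = cnt xs M := by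
  induction xs with
  | nil => simp [costB, cnt]
  | cons x t ih =>
    have hx := hb x (by simp)
    have ht := ih (fun y hy => hb y (by simp [hy]))
    simp only [costB, List.map_cons, List.sum_cons, cnt, List.count_cons, beq_iff_eq] at ht ⊢
    by_cases hxm : x = M
    · rw [if_pos (by omega : x > M - 1), if_pos hxm]; push_cast; omega
    · rw [if_neg (by omega : ¬ x > M - 1), if_neg hxm]; push_cast; omega
theorem costB_pred2 (xs : List Int) {M : Int} (hb : ∀ x ∈ xs, x ≤ M) :
    costB xs (M - 2) = 2 * cnt xs M + cnt xs (M - 1) := by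
  induction xs with
  | nil => simp [costB, cnt]
  | cons x t ih =>
    have hx := hb x (by simp)
    have ht := ih (fun y hy => hb y (by simp [hy]))
    simp only [costB, List.map_cons, List.sum_cons, cnt, List.count_cons, beq_iff_eq] at ht ⊢
    by_cases hxm : x = M
    · rw [if_pos (by omega : x > M - 2), if_pos hxm, if_neg (by omega : ¬ x = M - 1)]
      push_cast; omega
    · by_cases hxm1 : x = M - 1
      · rw [if_pos (by omega : x > M - 2), if_neg hxm, if_pos hxm1]; push_cast; omega
      · rw [if_neg (by omega : ¬ x > M - 2), if_neg hxm, if_neg hxm1]; push_cast; omega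
theorem costB_decAll (xs : List Int) {M L : Int} (hb : ∀ x ∈ xs, x ≤ M) (h : L < M) :
    costB (decAll xs M) L = costB xs L - cnt xs M := by
  induction xs with
  | nil => simp [costB, cnt, decAll]
  | cons x t ih =>
    have hx := hb x (by simp)
    have ht := ih (fun y hy => hb y (by simp [hy]))
    simp only [costB, decAll, List.map_cons, List.sum_cons, cnt, List.count_cons, beq_iff_eq] at ht ⊢
    by_cases hxm : x = M
    · rw [if_pos hxm, if_pos hxm, if_pos (by omega : x > L)]
      by_cases h2 : x - 1 > L
      · rw [if_pos h2]; push_cast; omega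
      · rw [if_neg h2]; push_cast; omega
    · rw [if_neg hxm, if_neg hxm]
      by_cases h1 : x > L
      · rw [if_pos h1]; push_cast; omega
      · rw [if_neg h1]; push_cast; omega

-- square-sum splitting facts (all entries ≤ M)
theorem sq_split_top (xs : List Int) {M : Int} (hb : ∀ x ∈ xs, x ≤ M) :
    lowSq xs M + cnt xs M * (M * M) = sqSum xs ∧ hiCnt xs M = cnt xs M := by
  induction xs with
  | nil => simp [lowSq, hiCnt, cnt, sqSum]
  | cons x t ih =>
    have hx := hb x (by simp)
    obtain ⟨ht1, ht2⟩ := ih (fun y hy => hb y (by simp [hy]))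
    rw [lowSq_cons, sqSum_cons, cnt_cons, hiCnt_cons]
    by_cases hxm : x = M
    · subst hxm
      rw [if_pos rfl, if_neg (by omega : ¬ x < x), if_pos (le_refl x)]
      constructor
      · linear_combination ht1
      · omega
    · rw [if_neg hxm, if_pos (by omega : x < M), if_neg (by omega : ¬ M ≤ x)]
      constructor
      · linear_combination ht1
      · omega
theorem sq_split_pred (xs : List Int) {M : Int} (hb : ∀ x ∈ xs, x ≤ M) :
    lowSq xs (M - 1) + cnt xs (M - 1) * ((M - 1) * (M - 1)) + cnt xs M * (M * M) = sqSum xs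
      ∧ hiCnt xs (M - 1) = cnt xs (M - 1) + cnt xs M := by
  induction xs with
  | nil => simp [lowSq, hiCnt, cnt, sqSum]
  | cons x t ih =>
    have hx := hb x (by simp)
    obtain ⟨ht1, ht2⟩ := ih (fun y hy => hb y (by simp [hy]))
    rw [lowSq_cons, sqSum_cons, cnt_cons, cnt_cons, hiCnt_cons]
    by_cases hxm : x = M
    · subst hxm
      rw [if_neg (by omega : ¬ x < x - 1), if_neg (by omega : ¬ x = x - 1), if_pos rfl,
        if_pos (by omega : x - 1 ≤ x)]
      constructor
      · linear_combination ht1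
      · omega
    · by_cases hxm1 : x = M - 1
      · rw [if_neg (by omega : ¬ x < M - 1), if_pos hxm1, if_neg hxm,
          if_pos (by omega : M - 1 ≤ x)]
        constructor
        · rw [hxm1]; linear_combination ht1
        · omega
      · rw [if_pos (by omega : x < M - 1), if_neg hxm1, if_neg hxm,
          if_neg (by omega : ¬ M - 1 ≤ x)]
        constructor
        · linear_combination ht1
        · omega

-- decAll preserves the answer pieces below level M
theorem lowSq_decAll (xs : List Int) {M L : Int} (h : L ≤ M - 1) : lowSq (decAll xs M) L = lowSq xs L := by
  induction xs with
  | nil => simp [lowSq, decAll]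
  | cons x t ih =>
    simp only [decAll, List.map_cons] at *
    rw [lowSq_cons, lowSq_cons, ih]
    by_cases hxm : x = M
    · rw [if_pos hxm, hxm, if_neg (by omega : ¬ M - 1 < L), if_neg (by omega : ¬ M < L)]
    · rw [if_neg hxm]
theorem hiCnt_decAll (xs : List Int) {M L : Int} (h : L ≤ M - 1) : hiCnt (decAll xs M) L = hiCnt xs L := by
  induction xs with
  | nil => simp [hiCnt, decAll]
  | cons x t ih =>
    simp only [decAll, List.map_cons] at *
    rw [hiCnt_cons, hiCnt_cons, ih]
    by_cases hxm : x = M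
    · rw [if_pos hxm, hxm, if_pos (by omega : L ≤ M - 1), if_pos (by omega : L ≤ M)]
    · rw [if_neg hxm]

-- max? characterisation
theorem max_eq_of (xs : List Int) {M : Int} (hM : M ∈ xs) (hb : ∀ x ∈ xs, x ≤ M) :
    PySem.List.max? xs (fun y => y) = some M := by
  cases h : PySem.List.max? xs (fun y => y) with
  | none =>
    rw [PySem.List.max?_eq_none_iff] at h
    subst h; simp at hM
  | some M' =>
    have h1 := PySem.List.max?_isMax h M hM
    have h2 := hb M' (PySem.List.max?_mem h)
    have : M' = M := le_antisymm h2 h1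
    rw [this]

theorem max_decAll (xs : List Int) {M : Int} (hM : M ∈ xs) (hb : ∀ x ∈ xs, x ≤ M) :
    PySem.List.max? (decAll xs M) (fun y => y) = some (M - 1) := by
  apply max_eq_of
  · simp only [decAll, List.mem_map]
    exact ⟨M, hM, by simp⟩
  · intro y hy
    simp only [decAll, List.mem_map] at hy
    obtain ⟨x, hx, rfl⟩ := hy
    have := hb x hx
    by_cases hxm : x = M <;> simp [hxm] <;> omega

-- binary search returns the least level of cost ≤ no
theorem bsearch_eq (xs : List Int) (no : Int) (lo hi L : Int)
    (h1 : lo ≤ L) (h2 : L ≤ hi) (h3 : costB xs L ≤ no)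
    (h4 : ∀ K, lo ≤ K → K < L → ¬ costB xs K ≤ no) :
    bsearchB xs no lo hi = L := by
  by_cases hlt : lo < hi
  · obtain ⟨hm1, hm2⟩ := pvMidBounds lo hi hlt
    rw [bsearchB, dif_pos hlt]
    by_cases hc : costB xs (PySem.Int.floordiv (lo + hi) 2) ≤ no
    · simp only [hc, if_pos]
      have hLm : L ≤ PySem.Int.floordiv (lo + hi) 2 := by
        by_contra hcon
        exact h4 _ hm1 (by omega) hc
      exact bsearch_eq xs no lo _ L h1 hLm h3 h4
    · simp only [hc, if_neg, not_false_iff]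
      have hmL : PySem.Int.floordiv (lo + hi) 2 + 1 ≤ L := by
        by_contra hcon
        exact hc (le_trans (costB_antitone xs (by omega)) h3)
      exact bsearch_eq xs no _ hi L hmL h2 h3 (fun K hK1 hK2 => h4 K (by omega) hK2)
  · rw [bsearchB, dif_neg hlt]; omega
termination_by (hi - lo).toNat
decreasing_by
  · have := pvMidBounds lo hi hlt; omega
  · have := pvMidBounds lo hi hlt; omega

-- a least level always exists
theorem exists_level (xs : List Int) {M : Int} (hM : M ∈ xs) (hb : ∀ x ∈ xs, x ≤ M)
    {no : Int} (hno : 0 ≤ no) :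
    ∃ L, costB xs L ≤ no ∧ ¬ costB xs (L - 1) ≤ no := by
  have hQ : ∃ k : Nat, ¬ costB xs (M - (k : Int)) ≤ no := by
    refine ⟨no.toNat + 1, ?_⟩
    have := costB_ge xs hM (M - ((no.toNat + 1 : Nat) : Int))
    push_cast at this ⊢
    omega
  have hk0 := Nat.find_spec hQ
  have hk0pos : Nat.find hQ ≠ 0 := by
    intro h
    rw [h] at hk0
    exact hk0 (by simpa using le_trans (le_of_eq (costB_top xs hb (le_refl M))) hno)
  have hprev : costB xs (M - ((Nat.find hQ - 1 : Nat) : Int)) ≤ no := by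
    by_contra h
    exact Nat.find_min hQ (by omega : Nat.find hQ - 1 < Nat.find hQ) h
  refine ⟨M - (Nat.find hQ : Int) + 1, ?_, ?_⟩
  · have he : M - (Nat.find hQ : Int) + 1 = M - ((Nat.find hQ - 1 : Nat) : Int) := by
      push_cast [Nat.cast_sub (by omega : 1 ≤ Nat.find hQ)]; ring
    rw [he]; exact hprev
  · have he : M - (Nat.find hQ : Int) + 1 - 1 = M - (Nat.find hQ : Int) := by ring
    rw [he]; exact hk0

-- evaluation of solution_alt at the characterised level
theorem evalAlt (xs : List Int) (M no L : Int)
    (hmax : PySem.List.max? xs (fun y => y) = some M) (hno : 0 ≤ no)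
    (hL : costB xs L ≤ clampB no M xs) (hL1 : ¬ costB xs (L - 1) ≤ clampB no M xs) :
    solution_alt no xs = ansB xs L (clampB no M xs - costB xs L) := by
  have hmem := PySem.List.max?_mem hmax
  have hbnd := PySem.List.max?_isMax hmax
  have hclamp0 : 0 ≤ clampB no M xs := by
    have := costB_nonneg xs 0
    unfold clampB; split_ifs <;> omega
  have hbs : bsearchB xs (clampB no M xs) (M - clampB no M xs) M = L := by
    apply bsearch_eq
    · have := costB_ge xs hmem L; omega
    · by_contra hcon
      exact hL1 (le_trans (le_of_eq (costB_top xs hbnd (by omega))) hclamp0)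
    · exact hL
    · intro K hK1 hK2 hKc
      exact hL1 (le_trans (costB_antitone xs (by omega : K ≤ L - 1)) hKc)
  unfold solution_alt
  rw [hmax]
  simp only []
  have hcl : (if M ≥ 0 then min no (costB xs 0) else no) = clampB no M xs := rfl
  rw [hcl, hbs, foldl_pair]
  simp only [ansB, zero_add]

-- terminal cases
theorem alt_at_zero (xs : List Int) (no : Int) (hno : 0 ≤ no)
    (hmax : PySem.List.max? xs (fun y => y) = some 0) :
    solution_alt no xs = sqSum xs := by
  have hmem := PySem.List.max?_mem hmax
  have hbnd := PySem.List.max?_isMax hmax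
  have hc0 : costB xs 0 = 0 := costB_top xs hbnd (le_refl 0)
  have hclamp : clampB no 0 xs = 0 := by unfold clampB; rw [if_pos (le_refl (0:Int)), hc0]; omega
  have hcnt1 : 1 ≤ cnt xs (0 : Int) := by
    have := List.count_pos_iff.2 hmem
    unfold cnt; omega
  have hLm1 : costB xs (-1) = cnt xs 0 := by
    have := costB_pred xs hbnd
    norm_num at this; exact this
  rw [evalAlt xs 0 no 0 hmax hno (by rw [hclamp, hc0]) (by rw [hclamp]; norm_num; omega)]
  obtain ⟨h1, _⟩ := sq_split_top xs hbnd
  rw [hclamp, hc0]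
  unfold ansB
  linear_combination h1

theorem alt_else (xs : List Int) (M no : Int) (hmax : PySem.List.max? xs (fun y => y) = some M)
    (hM : M ≠ 0) (h0 : 0 ≤ no) (h1 : no ≤ cnt xs M) :
    solution_alt no xs = sqSum xs - no * (2 * M - 1) := by
  have hmem := PySem.List.max?_mem hmax
  have hbnd := PySem.List.max?_isMax hmax
  have hcnt1 : 1 ≤ cnt xs M := by
    have := List.count_pos_iff.2 hmem
    unfold cnt; omega
  have hpred : costB xs (M - 1) = cnt xs M := costB_pred xs hbnd
  have htop : costB xs M = 0 := costB_top xs hbnd (le_refl M)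
  have hclamp : clampB no M xs = no := by
    unfold clampB
    split_ifs with h
    · have := costB_antitone xs (by omega : (0:Int) ≤ M - 1); omega
    · rfl
  by_cases hlt : no < cnt xs M
  · rw [evalAlt xs M no M hmax h0 (by omega) (by omega)]
    obtain ⟨hs1, hs2⟩ := sq_split_top xs hbnd
    rw [hclamp, htop]
    unfold ansB
    rw [hs2]
    linear_combination hs1
  · have hno : no = cnt xs M := by omega
    have hpred2 : costB xs (M - 2) = 2 * cnt xs M + cnt xs (M - 1) := costB_pred2 xs hbnd
    have hc1 : 0 ≤ cnt xs (M - 1) := by unfold cnt; positivity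
    rw [evalAlt xs M no (M - 1) hmax h0 (by omega) (by rw [show M - 1 - 1 = M - 2 by ring]; omega)]
    obtain ⟨hp1, hp2⟩ := sq_split_pred xs hbnd
    rw [hclamp, hpred]
    unfold ansB
    rw [hp2, hno]
    linear_combination hp1

-- the step: one round of A's loop preserves B's value
theorem alt_step (xs : List Int) (M no : Int) (hmax : PySem.List.max? xs (fun y => y) = some M)
    (hM : M ≠ 0) (h0 : 0 ≤ no) (h1 : cnt xs M < no) :
    solution_alt no xs = solution_alt (no - cnt xs M) (decAll xs M) := by
  have hmem := PySem.List.max?_mem hmax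
  have hbnd := PySem.List.max?_isMax hmax
  have hcnt1 : 1 ≤ cnt xs M := by
    have := List.count_pos_iff.2 hmem
    unfold cnt; omega
  have hpred : costB xs (M - 1) = cnt xs M := costB_pred xs hbnd
  have hc00 : 0 ≤ costB xs 0 := costB_nonneg xs 0
  have hcnt_le : cnt xs M ≤ clampB no M xs := by
    unfold clampB
    split_ifs with h
    · have := costB_antitone xs (by omega : (0:Int) ≤ M - 1); omega
    · omega
  have hclamp0 : 0 ≤ clampB no M xs := by omega
  obtain ⟨L, hL, hL1⟩ := exists_level xs hmem hbnd hclamp0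
  have hLM : L ≤ M - 1 := by
    by_contra hcon
    push_neg at hcon
    exact hL1 (le_trans (le_trans (costB_antitone xs (by omega : M - 1 ≤ L - 1)) (le_of_eq hpred)) hcnt_le)
  have hmax' := max_decAll xs hmem hbnd
  have hshift : ∀ K : Int, K < M → costB (decAll xs M) K = costB xs K - cnt xs M :=
    fun K hK => costB_decAll xs hbnd hK
  have hclamp' : clampB (no - cnt xs M) (M - 1) (decAll xs M) = clampB no M xs - cnt xs M := by
    unfold clampB
    by_cases hM1 : (1:Int) ≤ M
    · rw [if_pos (by omega : M - 1 ≥ 0), if_pos (by omega : M ≥ 0), hshift 0 (by omega)]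
      omega
    · rw [if_neg (by omega : ¬ M - 1 ≥ 0), if_neg (by omega : ¬ M ≥ 0)]
  rw [evalAlt xs M no L hmax h0 hL hL1,
    evalAlt (decAll xs M) (M - 1) (no - cnt xs M) L hmax' (by omega)
      (by rw [hshift L (by omega), hclamp']; omega)
      (by rw [hshift (L - 1) (by omega), hclamp']; omega)]
  unfold ansB
  rw [lowSq_decAll xs hLM, hiCnt_decAll xs hLM, hclamp', hshift L (by omega)]
  ring

-- index-level loops reduce to value-level operations
theorem resList_eq (xs : List Int) (M : Int) :
    resList xs M = (natIdx xs M).map (Nat.cast : Nat → Int) := by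
  unfold resList natIdx
  rw [PySem.List.pyRange_one, List.filter_map]
  simp [Function.comp_def]

theorem natIdx_cons (x : Int) (t : List Int) (M : Int) :
    natIdx (x :: t) M = (if x = M then [0] else []) ++ (natIdx t M).map (· + 1) := by
  unfold natIdx
  rw [List.length_cons, List.range_succ_eq_map, List.filter_cons, List.filter_map]
  simp only [Function.comp_def, List.getD_cons_zero, List.getD_cons_succ, Nat.succ_eq_add_one]
  split_ifs with h h2 <;> simp_all

theorem decAllN_shift (x : Int) (xs : List Int) (ks : List Nat) :
    decAllN (x :: xs) (ks.map (· + 1)) = x :: decAllN xs ks := by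
  induction ks generalizing xs with
  | nil => rfl
  | cons k r ih =>
    show decAllN ((x :: xs).set (k + 1) ((x :: xs).getD (k + 1) 0 - 1)) (r.map (· + 1))
      = x :: decAllN (xs.set k (xs.getD k 0 - 1)) r
    rw [List.getD_cons_succ, List.set_cons_succ]
    exact ih _

theorem decAllN_natIdx (xs : List Int) (M : Int) : decAllN xs (natIdx xs M) = decAll xs M := by
  induction xs with
  | nil => rfl
  | cons x t ih =>
    rw [natIdx_cons]
    by_cases hxm : x = M
    · rw [if_pos hxm, List.cons_append, List.nil_append]
      show decAllN ((x :: t).set 0 ((x :: t).getD 0 0 - 1)) ((natIdx t M).map (· + 1)) = _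
      rw [List.getD_cons_zero, List.set_cons_zero, decAllN_shift, ih]
      simp [decAll, hxm]
    · rw [if_neg hxm, List.nil_append, decAllN_shift, ih]
      simp [decAll, hxm]

theorem decAllIdx_cast (xs : List Int) (ks : List Nat) :
    decAllIdx xs (ks.map (Nat.cast : Nat → Int)) = decAllN xs ks := by
  induction ks generalizing xs with
  | nil => rfl
  | cons k r ih =>
    rw [List.map_cons]
    show decAllIdx (PySem.List.pySetD xs (k : Int) (PySem.List.pyGetD xs (k : Int) 0 - 1))
        (r.map (Nat.cast : Nat → Int)) = decAllN (xs.set k (xs.getD k 0 - 1)) r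
    rw [PySem.List.pySetD_natCast, PySem.List.pyGetD_natCast]
    exact ih _

theorem decAllIdx_eq (xs : List Int) (M : Int) : decAllIdx xs (resList xs M) = decAll xs M := by
  rw [resList_eq, decAllIdx_cast, decAllN_natIdx]

theorem decSomeN_shift (x : Int) (xs : List Int) (no : Int) (ks : List Nat) :
    decSomeN (x :: xs) no (ks.map (· + 1))
      = (x :: (decSomeN xs no ks).1, (decSomeN xs no ks).2) := by
  induction ks generalizing xs no with
  | nil => rfl
  | cons k r ih =>
    simp only [List.map_cons, decSomeN]
    by_cases h : no = 0
    · simp [h]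
    · simp only [h, if_neg, not_false_iff, List.set_cons_succ, List.getD_cons_succ]
      exact ih _ _

theorem decSomeIdx_cast (xs : List Int) (no : Int) (ks : List Nat) :
    decSomeIdx xs no (ks.map (Nat.cast : Nat → Int)) = decSomeN xs no ks := by
  induction ks generalizing xs no with
  | nil => rfl
  | cons k r ih =>
    simp only [List.map_cons, decSomeIdx, decSomeN, PySem.List.pySetD_natCast,
      PySem.List.pyGetD_natCast]
    by_cases h : no = 0
    · simp [h]
    · simp only [h, if_neg, not_false_iff]
      exact ih _ _

theorem decSomeN_spec (xs : List Int) (M no : Int) (h0 : 0 ≤ no) (h1 : no ≤ cnt xs M) :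
    (decSomeN xs no (natIdx xs M)).2 = 0
      ∧ sqSum (decSomeN xs no (natIdx xs M)).1 = sqSum xs - no * (2 * M - 1) := by
  induction xs generalizing no with
  | nil =>
    have hz : no = 0 := by simp [cnt] at h1; omega
    subst hz
    simp [natIdx, decSomeN]
  | cons x t ih =>
    rw [natIdx_cons]
    by_cases hxm : x = M
    · rw [if_pos hxm, List.cons_append, List.nil_append]
      by_cases hno : no = 0
      · subst hno
        simp [decSomeN]
      · simp only [decSomeN, if_neg hno, List.getD_cons_zero, List.set_cons_zero]
        rw [decSomeN_shift]
        have hcnt : cnt (x :: t) M = 1 + cnt t M := by rw [cnt_cons, if_pos hxm]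
        obtain ⟨ih1, ih2⟩ := ih (no - 1) (by omega) (by omega)
        refine ⟨ih1, ?_⟩
        rw [sqSum_cons, ih2, sqSum_cons, hxm]
        ring
    · rw [if_neg hxm, List.nil_append]
      rw [decSomeN_shift]
      have hcnt : cnt (x :: t) M = cnt t M := by rw [cnt_cons, if_neg hxm]; ring
      obtain ⟨ih1, ih2⟩ := ih no h0 (by omega)
      refine ⟨ih1, ?_⟩
      rw [sqSum_cons, ih2, sqSum_cons]
      ring

theorem decSomeIdx_eq (xs : List Int) (M no : Int) (h0 : 0 ≤ no) (h1 : no ≤ cnt xs M) :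
    (decSomeIdx xs no (resList xs M)).2 = 0
      ∧ sqSum (decSomeIdx xs no (resList xs M)).1 = sqSum xs - no * (2 * M - 1) := by
  rw [resList_eq, decSomeIdx_cast]
  exact decSomeN_spec xs M no h0 h1

-- the main induction over A's loop
theorem loopA_eq (fuel : Nat) (no : Int) (xs : List Int) (hxs : xs ≠ []) (h0 : 0 ≤ no)
    (hfuel : no.toNat < fuel) : sqSum (loopA fuel no xs) = solution_alt no xs := by
  induction fuel generalizing no xs with
  | zero => omega
  | succ f ih =>
    cases hmax : PySem.List.max? xs (fun y => y) with
    | none => exact absurd ((PySem.List.max?_eq_none_iff xs _).1 hmax) hxs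
    | some M =>
      have hmem := PySem.List.max?_mem hmax
      have hbnd := PySem.List.max?_isMax hmax
      have hcnt_eq : (PySem.List.count xs M : Int) = cnt xs M := by
        rw [PySem.List.count_eq]; rfl
      have hcnt1 : 1 ≤ cnt xs M := by
        have := List.count_pos_iff.2 hmem
        unfold cnt; omega
      simp only [loopA, hmax]
      by_cases hM : M = 0
      · rw [if_neg (by simp [hM])]
        exact (alt_at_zero xs no h0 (hM ▸ hmax)).symm
      · rw [if_pos (by simp [hM])]
        by_cases hgt : no > (PySem.List.count xs M : Int)
        · rw [if_pos hgt]
          have hlen : (decAllIdx xs (resList xs M)).length ≠ 0 := by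
            rw [decAllIdx_eq]
            simp [decAll, List.length_eq_zero_iff, hxs]
          rw [if_neg (by push_neg; exact ⟨by omega, by omega⟩)]
          rw [decAllIdx_eq, hcnt_eq]
          rw [ih (no - cnt xs M) (decAll xs M)
            (by simpa [decAll] using hxs) (by omega) (by omega)]
          exact (alt_step xs M no hmax hM h0 (by omega)).symm
        · rw [if_neg hgt]
          obtain ⟨hp2, hp1⟩ := decSomeIdx_eq xs M no h0 (by omega)
          rw [if_pos (Or.inl hp2)]
          rw [hp1]
          exact (alt_else xs M no hmax hM h0 (by omega)).symm

-- ===== VERDICT (by name: the statement is the Claim_ definition above) =====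
theorem solution_spec : Claim_equal_solution := by
  intro no works _ hpre
  unfold Spec_solution solution
  rw [sqSum_foldl, zero_add, loopA_eq (no.toNat + 1) no works hpre.1 hpre.2 (by omega)]
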